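-- pv_equiv track=rewrite | github.com/jim0409/PythonLearning-DataStructureLearning | Algorithm_Learning/chapter07_tree_algorithm/practice/01.practice.py | Btree_create
-- ===== SOURCE A (Python) =====
-- def Btree_create(btree_deep, data):
--     btree = [0]*pow(2, btree_deep)
--     for i in range(1, len(data)):
--         level = 1
--         while btree[level] is not 0:
--             if data[i] > btree[level]:  # if the max value is inside the tree, compare them with child tree
--                 level = level * 2 + 1
--
--             else:
--                 level = level * 2
--
--         btree[level] = data[i]
--     return btree
-- ===== SOURCE B (Python) =====
-- def _insert(node, v):
--     # insert into an explicit BST (ties go left, matching A's descent rule)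
--     if node is None:
--         return [v, None, None]
--     if v > node[0]:
--         node[2] = _insert(node[2], v)
--     else:
--         node[1] = _insert(node[1], v)
--     return node
--
--
-- def _fill(btree, node, idx):
--     # lay the tree out in the heap-style array: root at idx, children at 2*idx, 2*idx+1
--     if node is None:
--         return
--     btree[idx] = node[0]
--     _fill(btree, node[1], idx * 2)
--     _fill(btree, node[2], idx * 2 + 1)
--
--
-- def Btree_create(btree_deep, data):
--     btree = [0] * pow(2, btree_deep)
--     root = None
--     for v in data[1:]:
--         root = _insert(root, v)
--     _fill(btree, root, 1)
--     return btree
-- ===== Notes on version B (the rewrite author's own statement) =====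
-- stated objective: alternative
-- what changed: B builds an explicit linked BST by recursive insertion and then lays it out into the heap-style array in one recursive pass, instead of A's per-element iterative index-doubling descent through the array.
-- outside the precondition, e.g. on Btree_create(2, [9, 0, 5]): A returns [0, 5, 0, 0], B returns [0, 0, 0, 5]
import Mathlib
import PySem

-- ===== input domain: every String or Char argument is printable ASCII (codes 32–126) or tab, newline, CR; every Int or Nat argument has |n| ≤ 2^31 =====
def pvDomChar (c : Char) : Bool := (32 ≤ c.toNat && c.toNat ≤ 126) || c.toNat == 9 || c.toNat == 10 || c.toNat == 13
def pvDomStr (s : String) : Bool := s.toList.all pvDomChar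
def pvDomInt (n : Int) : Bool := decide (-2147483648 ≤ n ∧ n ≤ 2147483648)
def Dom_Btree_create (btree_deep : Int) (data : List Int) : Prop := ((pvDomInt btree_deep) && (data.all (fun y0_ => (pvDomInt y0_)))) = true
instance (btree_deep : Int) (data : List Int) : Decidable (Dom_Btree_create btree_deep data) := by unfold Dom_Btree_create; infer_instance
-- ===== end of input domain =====

-- B builds an explicit linked BST and then lays it out into the array in one pass,
-- instead of A's per-element iterative index-doubling descent through the array (objective: alternative).

-- ===== PORT A =====
-- the inner `while btree[level] is not 0` descent; out-of-range access is a Python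
-- IndexError (excluded by Pre_), here the array is returned unchanged
def pvDescendA (btree : List Int) (level : Nat) (v : Int) : List Int :=
  if h : 1 ≤ level ∧ level < btree.length then
    if btree.getD level 0 ≠ 0 then
      if v > btree.getD level 0 then pvDescendA btree (level * 2 + 1) v
      else pvDescendA btree (level * 2) v
    else btree.set level v
  else btree
termination_by btree.length - level
decreasing_by all_goals omega

def Btree_create (btree_deep : Int) (data : List Int) : List Int :=
  (PySem.List.pyRange 1 (data.length : Int) 1).foldl
    (fun btree i => pvDescendA btree 1 (PySem.List.pyGetD data i 0))
    (List.replicate (2 ^ btree_deep.toNat) 0)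

-- ===== PORT B =====
inductive pvBT : Type
  | leaf : pvBT
  | node : Int → pvBT → pvBT → pvBT
deriving DecidableEq, Repr

-- _insert: recursive BST insertion (ties go left)
def pvInsert : pvBT → Int → pvBT
  | .leaf, v => .node v .leaf .leaf
  | .node x l r, v => if v > x then .node x l (pvInsert r v) else .node x (pvInsert l v) r

-- _fill: root at idx, children at idx*2, idx*2+1 (List.set ignores out-of-range writes,
-- where the Python raises; excluded by Pre_)
def pvFill : pvBT → Nat → List Int → List Int
  | .leaf, _, arr => arr
  | .node x l r, i, arr => pvFill r (i * 2 + 1) (pvFill l (i * 2) (arr.set i x))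

def Btree_create_alt (btree_deep : Int) (data : List Int) : List Int :=
  pvFill ((data.drop 1).foldl pvInsert .leaf) 1 (List.replicate (2 ^ btree_deep.toNat) 0)

-- ===== PRECONDITION & SPEC =====
-- the tree has height at most d, i.e. its heap layout fits in 2^d slots
def pvDepthLe : pvBT → Nat → Bool
  | .leaf, _ => true
  | .node _ _ _, 0 => false
  | .node _ l r, d + 1 => pvDepthLe l d && pvDepthLe r d

-- Pre_ excludes exactly: btree_deep < 0, where A raises TypeError; inputs whose
-- BST built from data[1:] does not fit in the 2^btree_deep array, where A raises
-- IndexError (and B raises it too); and lists with 0 among the inserted values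
-- data[1:], a sentinel collision on which A silently treats the stored 0 as an
-- empty slot and overwrites it — an accidental corner where either value is defensible.
def Pre_Btree_create (btree_deep : Int) (data : List Int) : Prop :=
  0 ≤ btree_deep ∧ (0 : Int) ∉ data.drop 1 ∧
    pvDepthLe ((data.drop 1).foldl pvInsert .leaf) btree_deep.toNat = true

instance (btree_deep : Int) (data : List Int) : Decidable (Pre_Btree_create btree_deep data) := by
  unfold Pre_Btree_create; infer_instance

def pvWitness_Btree_create : Int × List Int := (3, [10, 5, 8, 2])

def Spec_Btree_create (btree_deep : Int) (data : List Int) (out : List Int) : Prop := out = Btree_create_alt btree_deep data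
instance (btree_deep : Int) (data : List Int) (out : List Int) : Decidable (Spec_Btree_create btree_deep data out) := by unfold Spec_Btree_create; infer_instance

-- ===== CLAIM (what is proved, stated in full; the proofs are below) =====
def Claim_equal_Btree_create : Prop := ∀ (btree_deep : Int) (data : List Int), Dom_Btree_create btree_deep data → Pre_Btree_create btree_deep data → Spec_Btree_create btree_deep data (Btree_create btree_deep data)

-- ===== LEMMAS AND PROOFS =====

-- every heap index of the tree rooted at i stays below n (the layout fits the array)
def pvFits : pvBT → Nat → Nat → Bool
  | .leaf, _, _ => true
  | .node _ l r, i, n => decide (i < n) && pvFits l (i * 2) n && pvFits r (i * 2 + 1) n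

theorem pvFits_of_depth (t : pvBT) (d i n : Nat) (h : pvDepthLe t d = true)
    (hi : 1 ≤ i) (hb : (i + 1) * 2 ^ d ≤ 2 * n) : pvFits t i n = true := by
  induction t generalizing i d with
  | leaf => rfl
  | node x l r ihl ihr =>
    cases d with
    | zero => exact absurd h (by simp [pvDepthLe])
    | succ d =>
      simp only [pvDepthLe, Bool.and_eq_true] at h
      have h2 : (2 : Nat) ≤ 2 ^ (d + 1) := by
        calc (2 : Nat) = 2 ^ 1 := by norm_num
          _ ≤ 2 ^ (d + 1) := Nat.pow_le_pow_right (by norm_num) (by omega)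
      have hiN : i < n := by
        have h3 : (i + 1) * 2 ≤ (i + 1) * 2 ^ (d + 1) := Nat.mul_le_mul_left _ h2
        omega
      simp only [pvFits, Bool.and_eq_true, decide_eq_true_eq]
      refine ⟨⟨hiN, ihl d _ h.1 (by omega) ?_⟩, ihr d _ h.2 (by omega) ?_⟩
      · calc (i * 2 + 1) * 2 ^ d ≤ (i * 2 + 2) * 2 ^ d := Nat.mul_le_mul_right _ (by omega)
          _ = (i + 1) * 2 ^ (d + 1) := by ring
          _ ≤ 2 * n := hb
      · calc (i * 2 + 1 + 1) * 2 ^ d = (i + 1) * 2 ^ (d + 1) := by ring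
          _ ≤ 2 * n := hb

def pvNZ : pvBT → Prop
  | .leaf => True
  | .node x l r => x ≠ 0 ∧ pvNZ l ∧ pvNZ r

-- index j lies in the heap-layout subtree rooted at index i
def pvInSub (i j : Nat) : Prop := ∃ k, i * 2 ^ k ≤ j ∧ j < (i + 1) * 2 ^ k

theorem pvInSub_self (i : Nat) : pvInSub i i := ⟨0, by simp⟩

theorem pvInSub_left {i j : Nat} (h : pvInSub (i * 2) j) : pvInSub i j := by
  obtain ⟨k, h1, h2⟩ := h
  refine ⟨k + 1, ?_, ?_⟩ <;> · rw [pow_succ]; ring_nf; ring_nf at h1 h2; omega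

theorem pvInSub_right {i j : Nat} (h : pvInSub (i * 2 + 1) j) : pvInSub i j := by
  obtain ⟨k, h1, h2⟩ := h
  refine ⟨k + 1, ?_, ?_⟩ <;> · rw [pow_succ]; ring_nf; ring_nf at h1 h2; omega

theorem pvNot_inSub_of_lt {i j : Nat} (h : j < i) : ¬ pvInSub i j := by
  rintro ⟨k, h1, h2⟩
  have hp : 1 ≤ 2 ^ k := Nat.one_le_two_pow
  have : i * 1 ≤ i * 2 ^ k := Nat.mul_le_mul_left i hp
  omega

theorem pvSub_disjoint {i j : Nat} (hi : 1 ≤ i) (hl : pvInSub (i * 2) j) (hr : pvInSub (i * 2 + 1) j) : False := by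
  obtain ⟨a, la, ua⟩ := hl
  obtain ⟨b, lb, ub⟩ := hr
  rcases Nat.le_total a b with hab | hab
  · have hpq : (2 : Nat) ^ a ≤ 2 ^ b := Nat.pow_le_pow_right (by norm_num) hab
    have h1 : (i * 2 + 1) * 2 ^ a ≤ (i * 2 + 1) * 2 ^ b := Nat.mul_le_mul_left _ hpq
    exact lt_irrefl _ (lt_of_le_of_lt lb (lt_of_lt_of_le ua h1))
  · rcases Nat.eq_or_lt_of_le hab with heq | hlt
    · rw [heq] at lb
      exact lt_irrefl _ (lt_of_le_of_lt lb ua)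
    · have hb1 : b + 1 ≤ a := hlt
      have hpq : (2 : Nat) ^ b * 2 ≤ 2 ^ a := by
        calc (2 : Nat) ^ b * 2 = 2 ^ (b + 1) := (pow_succ 2 b).symm
          _ ≤ 2 ^ a := Nat.pow_le_pow_right (by norm_num) hb1
      have hchain : (i * 2 + 1 + 1) * 2 ^ b ≤ i * 2 * 2 ^ a := by
        calc (i * 2 + 1 + 1) * 2 ^ b ≤ i * 2 * 2 * 2 ^ b := Nat.mul_le_mul_right _ (by omega)
          _ = i * 2 * (2 ^ b * 2) := by ring
          _ ≤ i * 2 * 2 ^ a := Nat.mul_le_mul_left _ hpq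
      exact absurd (lt_of_lt_of_le (lt_of_lt_of_le ub hchain) la) (lt_irrefl j)

theorem pvFill_length (t : pvBT) (i : Nat) (arr : List Int) : (pvFill t i arr).length = arr.length := by
  induction t generalizing i arr with
  | leaf => rfl
  | node x l r ihl ihr => simp [pvFill, ihr, ihl]

theorem pvFill_get_not_inSub (t : pvBT) (i j : Nat) (arr : List Int) (h : ¬ pvInSub i j) :
    (pvFill t i arr)[j]? = arr[j]? := by
  induction t generalizing i arr with
  | leaf => rfl
  | node x l r ihl ihr =>
    have hj : j ≠ i := fun e => h (e ▸ pvInSub_self i)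
    rw [pvFill, ihr _ _ (fun hs => h (pvInSub_right hs)), ihl _ _ (fun hs => h (pvInSub_left hs)),
      List.getElem?_set_ne (by omega)]

theorem pvSet_fill_comm (t : pvBT) (i j : Nat) (x : Int) (arr : List Int) (h : ¬ pvInSub i j) :
    (pvFill t i arr).set j x = pvFill t i (arr.set j x) := by
  induction t generalizing i arr with
  | leaf => rfl
  | node y l r ihl ihr =>
    have hj : j ≠ i := fun e => h (e ▸ pvInSub_self i)
    rw [pvFill, pvFill, ihr _ _ (fun hs => h (pvInSub_right hs)),
      ihl _ _ (fun hs => h (pvInSub_left hs)), List.set_comm]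
    omega

theorem pvFill_comm (t1 t2 : pvBT) (i1 i2 : Nat) (arr : List Int)
    (h : ∀ j, pvInSub i1 j → ¬ pvInSub i2 j) :
    pvFill t1 i1 (pvFill t2 i2 arr) = pvFill t2 i2 (pvFill t1 i1 arr) := by
  induction t1 generalizing arr i1 with
  | leaf => rfl
  | node x l r ihl ihr =>
    rw [pvFill, pvFill, pvSet_fill_comm t2 i2 i1 x arr (h i1 (pvInSub_self i1)),
      ihl (i1 * 2) _ (fun j hj => h j (pvInSub_left hj)),
      ihr (i1 * 2 + 1) _ (fun j hj => h j (pvInSub_right hj))]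

theorem pvFill_get_root (x : Int) (l r : pvBT) (i : Nat) (arr : List Int) (hi : 1 ≤ i)
    (hlen : i < arr.length) : (pvFill (.node x l r) i arr).getD i 0 = x := by
  rw [List.getD_eq_getElem?_getD, pvFill,
    pvFill_get_not_inSub _ _ _ _ (pvNot_inSub_of_lt (by omega)),
    pvFill_get_not_inSub _ _ _ _ (pvNot_inSub_of_lt (by omega)),
    List.getElem?_set_self (by simpa using hlen)]
  rfl

theorem pvFits_node {x : Int} {l r : pvBT} {i n : Nat}
    (h : pvFits (.node x l r) i n = true) :
    i < n ∧ pvFits l (i * 2) n = true ∧ pvFits r (i * 2 + 1) n = true := by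
  simp only [pvFits, Bool.and_eq_true, decide_eq_true_eq] at h
  exact ⟨h.1.1, h.1.2, h.2⟩

theorem pvFits_insert_rev (t : pvBT) (v : Int) (i n : Nat)
    (h : pvFits (pvInsert t v) i n = true) : pvFits t i n = true := by
  induction t generalizing i with
  | leaf => rfl
  | node x l r ihl ihr =>
    by_cases hgt : v > x
    · rw [pvInsert, if_pos hgt] at h
      obtain ⟨h1, h2, h3⟩ := pvFits_node h
      simp only [pvFits, Bool.and_eq_true, decide_eq_true_eq]
      exact ⟨⟨h1, h2⟩, ihr _ h3⟩
    · rw [pvInsert, if_neg hgt] at h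
      obtain ⟨h1, h2, h3⟩ := pvFits_node h
      simp only [pvFits, Bool.and_eq_true, decide_eq_true_eq]
      exact ⟨⟨h1, ihl _ h2⟩, h3⟩

theorem pvFits_foldl_rev (l : List Int) (t : pvBT) (i n : Nat)
    (h : pvFits (l.foldl pvInsert t) i n = true) : pvFits t i n = true := by
  induction l generalizing t with
  | nil => exact h
  | cons w l ih => exact pvFits_insert_rev t w i n (ih (pvInsert t w) h)

theorem pvDescend_fill (t : pvBT) (i : Nat) (v : Int) (arr : List Int) (hi : 1 ≤ i)
    (hnz : pvNZ t) (hfit : pvFits (pvInsert t v) i arr.length = true)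
    (hz : ∀ j, pvInSub i j → arr.getD j 0 = 0) :
    pvDescendA (pvFill t i arr) i v = pvFill (pvInsert t v) i arr := by
  induction t generalizing i arr with
  | leaf =>
    have hiN : i < arr.length := by
      have := pvFits_node (x := v) (l := .leaf) (r := .leaf) (by simpa [pvInsert] using hfit)
      exact this.1
    show pvDescendA arr i v = pvFill (pvInsert .leaf v) i arr
    rw [pvDescendA, dif_pos ⟨hi, hiN⟩, hz i (pvInSub_self i)]
    simp [pvInsert, pvFill]
  | node x l r ihl ihr =>
    obtain ⟨hx, hnzl, hnzr⟩ := hnz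
    have hlenF : (pvFill (.node x l r) i arr).length = arr.length := pvFill_length _ _ _
    by_cases hgt : v > x
    · rw [pvInsert, if_pos hgt] at hfit ⊢
      obtain ⟨hiN, hfl, hfr⟩ := pvFits_node hfit
      rw [pvDescendA, dif_pos ⟨hi, by omega⟩, pvFill_get_root x l r i arr hi hiN,
        if_pos hx, if_pos hgt]
      have hrw : pvFill (pvBT.node x l r) i arr
          = pvFill r (i * 2 + 1) (pvFill l (i * 2) (arr.set i x)) := rfl
      rw [hrw, ihr (i * 2 + 1) _ (by omega) hnzr
        (by rw [pvFill_length, List.length_set]; exact hfr) ?_]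
      · rfl
      · intro j hj
        have hji : j ≠ i := by
          intro e; subst e; exact pvNot_inSub_of_lt (show j < j * 2 + 1 by omega) hj
        rw [List.getD_eq_getElem?_getD,
          pvFill_get_not_inSub _ _ _ _ (fun hs => pvSub_disjoint hi hs hj),
          List.getElem?_set_ne (by omega), ← List.getD_eq_getElem?_getD]
        exact hz j (pvInSub_right hj)
    · rw [pvInsert, if_neg hgt] at hfit ⊢
      obtain ⟨hiN, hfl, hfr⟩ := pvFits_node hfit
      rw [pvDescendA, dif_pos ⟨hi, by omega⟩, pvFill_get_root x l r i arr hi hiN,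
        if_pos hx, if_neg hgt]
      have hrw : pvFill (pvBT.node x l r) i arr
          = pvFill r (i * 2 + 1) (pvFill l (i * 2) (arr.set i x)) := rfl
      have hdisj : ∀ j, pvInSub (i * 2 + 1) j → ¬ pvInSub (i * 2) j :=
        fun j h1 h2 => pvSub_disjoint hi h2 h1
      rw [hrw, pvFill_comm r l (i * 2 + 1) (i * 2) _ hdisj,
        ihl (i * 2) _ (by omega) hnzl
          (by rw [pvFill_length, List.length_set]; exact hfl) ?_,
        ← pvFill_comm r _ (i * 2 + 1) (i * 2) _ hdisj]
      · rfl
      · intro j hj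
        have hji : j ≠ i := by
          intro e; subst e; exact pvNot_inSub_of_lt (show j < j * 2 by omega) hj
        rw [List.getD_eq_getElem?_getD,
          pvFill_get_not_inSub _ _ _ _ (fun hs => pvSub_disjoint hi hj hs),
          List.getElem?_set_ne (by omega), ← List.getD_eq_getElem?_getD]
        exact hz j (pvInSub_left hj)

theorem pvNZ_insert (t : pvBT) (v : Int) (h : pvNZ t) (hv : v ≠ 0) : pvNZ (pvInsert t v) := by
  induction t with
  | leaf => exact ⟨hv, trivial, trivial⟩
  | node x l r ihl ihr =>
    obtain ⟨hx, hl, hr⟩ := h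
    by_cases hgt : v > x
    · simp only [pvInsert, hgt, if_pos, pvNZ]
      exact ⟨hx, hl, ihr hr⟩
    · simp only [pvInsert, hgt, pvNZ, ite_false]
      exact ⟨hx, ihl hl, hr⟩

theorem pvMain_fold (l : List Int) (t : pvBT) (dp : Nat) (hnz : pvNZ t)
    (h0 : (0 : Int) ∉ l) (hfits : pvFits (l.foldl pvInsert t) 1 (2 ^ dp) = true) :
    l.foldl (fun btree w => pvDescendA btree 1 w) (pvFill t 1 (List.replicate (2 ^ dp) 0)) =
      pvFill (l.foldl pvInsert t) 1 (List.replicate (2 ^ dp) 0) := by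
  induction l generalizing t with
  | nil => rfl
  | cons w l ih =>
    rw [List.mem_cons] at h0
    push Not at h0
    obtain ⟨hw0, h0l⟩ := h0
    have hw : w ≠ 0 := fun e => hw0 e.symm
    simp only [List.foldl_cons]
    simp only [List.foldl_cons] at hfits
    rw [pvDescend_fill t 1 w _ (by norm_num) hnz ?_ ?_]
    · exact ih (pvInsert t w) (pvNZ_insert t w hnz hw) h0l hfits
    · rw [List.length_replicate]
      exact pvFits_foldl_rev l (pvInsert t w) 1 (2 ^ dp) hfits
    · intro j _
      rw [List.getD_eq_getElem?_getD, List.getElem?_replicate]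
      split <;> rfl

theorem pvBridge_aux (data : List Int) : ∀ (m k : Nat) (init : List Int),
    data.length - k = m → k ≤ data.length →
    (PySem.List.pyRange (k : Int) (data.length : Int) 1).foldl
        (fun btree i => pvDescendA btree 1 (PySem.List.pyGetD data i 0)) init =
      (data.drop k).foldl (fun btree w => pvDescendA btree 1 w) init := by
  intro m
  induction m with
  | zero =>
    intro k init hm hk
    have hkl : k = data.length := by omega
    subst hkl
    rw [PySem.List.pyRange_one_eq_nil (le_refl _), List.drop_length]
    rfl
  | succ n ihn =>
    intro k init hm hk
    have hklt : k < data.length := by omega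
    rw [PySem.List.pyRange_one_cons (by exact_mod_cast hklt), List.foldl_cons]
    have hg : PySem.List.pyGetD data (k : Int) 0 = data[k] := by
      rw [PySem.List.pyGetD_natCast]
      exact List.getD_eq_getElem data 0 hklt
    have hdrop : data.drop k = data[k] :: data.drop (k + 1) :=
      (List.getElem_cons_drop hklt).symm
    rw [hg, hdrop, List.foldl_cons,
      show (k : Int) + 1 = ((k + 1 : Nat) : Int) by push_cast; ring]
    exact ihn (k + 1) _ (by omega) (by omega)

theorem pvBridge (data : List Int) (init : List Int) :
    (PySem.List.pyRange 1 (data.length : Int) 1).foldl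
        (fun btree i => pvDescendA btree 1 (PySem.List.pyGetD data i 0)) init =
      (data.drop 1).foldl (fun btree w => pvDescendA btree 1 w) init := by
  rcases Nat.eq_zero_or_pos data.length with h | h
  · rw [PySem.List.pyRange_one_eq_nil (by omega), List.drop_eq_nil_of_le (by omega)]
    rfl
  · exact_mod_cast pvBridge_aux data (data.length - 1) 1 init (by omega) (by omega)

-- ===== VERDICT (by name: the statement is the Claim_ definition above) =====
theorem Btree_create_spec : Claim_equal_Btree_create := by
  intro btree_deep data _ hpre
  obtain ⟨hd, h0, hfits⟩ := hpre
  unfold Spec_Btree_create Btree_create Btree_create_alt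
  rw [pvBridge]
  have hm := pvMain_fold (data.drop 1) .leaf btree_deep.toNat trivial h0
    (pvFits_of_depth _ _ 1 _ hfits (by norm_num) (by ring_nf; omega))
  simpa [pvFill] using hm
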